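-- pv_equiv track=rewrite | github.com/Zhuohang-Shen/dyana | dyana/view_legacy.py | count_package_prefixes
-- ===== SOURCE A (Python) =====
-- def count_package_prefixes(path_dict: dict[str, str], level: int = 2) -> dict[str, int]:
--     from collections import defaultdict
--
--     prefix_counter: defaultdict[str, int] = defaultdict(int)
--
--     for package_path in path_dict.keys():
--         parts = package_path.split(".")
--         if len(parts) >= level:
--             prefix = ".".join(parts[:level])
--         else:
--             prefix = parts[0]
--
--         prefix_counter[prefix] += 1
--
--     return dict(prefix_counter)
-- ===== SOURCE B (Python) =====
-- def count_package_prefixes(path_dict: dict[str, str], level: int = 2) -> dict[str, int]: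
--     def prefix_of(key: str) -> str:
--         parts = key.split(".")
--         return ".".join(parts[:level]) if len(parts) >= level else parts[0]
--
--     prefixes = [prefix_of(key) for key in path_dict.keys()]
--     # group equal prefixes as runs of the sorted list
--     runs: dict[str, int] = {}
--     prev = None
--     for p in sorted(prefixes):
--         if p == prev:
--             runs[p] += 1
--         else:
--             runs[p] = 1
--             prev = p
--     # re-emit the counts in first-occurrence order
--     return {p: runs[p] for p in dict.fromkeys(prefixes)}
-- ===== Notes on version B (the rewrite author's own statement) =====
-- stated objective: alternative
-- what changed: Replaces the running defaultdict tally with ordering-based grouping: map every key to its prefix, sort the prefix list, count runs of equal prefixes in one scan, then re-emit the counts in first-occurrence order via dict.fromkeys.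
import Mathlib
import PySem

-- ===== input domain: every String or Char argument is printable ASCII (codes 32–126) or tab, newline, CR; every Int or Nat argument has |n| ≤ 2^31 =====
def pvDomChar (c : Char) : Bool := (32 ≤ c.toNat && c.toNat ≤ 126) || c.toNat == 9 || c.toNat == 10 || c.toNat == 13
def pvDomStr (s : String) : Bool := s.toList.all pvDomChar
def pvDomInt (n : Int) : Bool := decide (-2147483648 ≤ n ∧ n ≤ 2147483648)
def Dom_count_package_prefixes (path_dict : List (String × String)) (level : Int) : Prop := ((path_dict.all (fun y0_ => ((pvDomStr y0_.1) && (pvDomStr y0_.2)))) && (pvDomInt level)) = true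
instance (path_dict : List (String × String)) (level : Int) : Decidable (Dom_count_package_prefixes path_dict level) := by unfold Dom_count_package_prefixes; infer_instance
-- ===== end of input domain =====

-- B replaces A's running defaultdict tally with ordering-based grouping: map keys to prefixes,
-- sort, count runs of equal prefixes, re-emit in first-occurrence order; alternative decomposition.

-- ===== PORT A =====
-- A's loop: for each key, split on ".", pick the prefix, increment prefix_counter[prefix].
-- split? returns some for the nonempty separator "." (.getD [] never fires) and a nonempty list, so parts.headD "" is Python's parts[0].
def count_package_prefixes (path_dict : List (String × String)) (level : Int) : List (String × Int) :=
  (path_dict.foldl (fun (prefix_counter : PySem.Dict String Int) kv =>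
      let parts := (PySem.Str.split? kv.1 ".").getD []
      let pfx := if level ≤ (parts.length : Int) then
          PySem.Str.join "." (PySem.List.slice parts none (some level))
        else parts.headD ""
      prefix_counter.modify pfx 0 (· + 1)) PySem.Dict.empty).items

-- ===== PORT B =====
-- B's helper prefix_of (the same branch as A's, as the task requires identical prefixes).
def pvPrefixOf (level : Int) (key : String) : String :=
  let parts := (PySem.Str.split? key ".").getD []
  if level ≤ (parts.length : Int) then
    PySem.Str.join "." (PySem.List.slice parts none (some level))
  else parts.headD ""

-- B: prefixes = [prefix_of(k) for k in path_dict]; scan sorted(prefixes) with state (runs, prev),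
-- extending the current run (runs[p] += 1, ported as modify: the key is present whenever p == prev)
-- or opening a new one (runs[p] = 1); then {p: runs[p] for p in dict.fromkeys(prefixes)}
-- (runs[p] exists for every p in prefixes, so the ported lookup's default 0 never fires).
def count_package_prefixes_alt (path_dict : List (String × String)) (level : Int) : List (String × Int) :=
  let prefixes := path_dict.map (fun kv => pvPrefixOf level kv.1)
  let st := (PySem.List.sorted prefixes (fun x => x) false).foldl
      (fun (st : PySem.Dict String Int × Option String) p =>
        if st.2 = some p then (st.1.modify p 0 (· + 1), st.2)
        else (st.1.insert p 1, some p))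
      (PySem.Dict.empty, none)
  ((PySem.List.dedup prefixes).foldl
      (fun (d : PySem.Dict String Int) p => d.insert p (st.1.getD p 0)) PySem.Dict.empty).items

-- ===== PRECONDITION & SPEC =====
def Spec_count_package_prefixes (path_dict : List (String × String)) (level : Int) (out : List (String × Int)) : Prop := out = count_package_prefixes_alt path_dict level
instance (path_dict : List (String × String)) (level : Int) (out : List (String × Int)) : Decidable (Spec_count_package_prefixes path_dict level out) := by unfold Spec_count_package_prefixes; infer_instance

-- ===== CLAIM (what is proved, stated in full; the proofs are below) =====
def Claim_equal_count_package_prefixes : Prop := ∀ (path_dict : List (String × String)) (level : Int), Dom_count_package_prefixes path_dict level → Spec_count_package_prefixes path_dict level (count_package_prefixes path_dict level)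

-- ===== LEMMAS AND PROOFS =====

-- A's fold over path_dict is the Counter of the mapped prefix list.
theorem pvA_eq_counter (path_dict : List (String × String)) (level : Int) :
    count_package_prefixes path_dict level
      = (PySem.Dict.counter (path_dict.map (fun kv => pvPrefixOf level kv.1))).items := by
  unfold count_package_prefixes
  rw [PySem.Dict.counter_eq_foldl, List.foldl_map]
  rfl

-- On a key absent from d, inserting 1 is the Counter increment step.
theorem pvInsert_one_eq_modify (d : PySem.Dict String Int) (x : String)
    (h : d.contains x = false) : d.insert x 1 = d.modify x 0 (· + 1) := by
  show d.insert x 1 = d.insert x (d.getD x 0 + 1)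
  rw [PySem.Dict.getD_of_not_contains d 0 h]
  norm_num

-- B's run scan over a sorted list computes the Counter fold: invariants say the only
-- key of the accumulator that can still occur in sp is prev's value, and prev's value
-- is ≤ everything still to come.
theorem pvRunScan (sp : List String) : ∀ (d : PySem.Dict String Int) (prev : Option String),
    sp.Pairwise (· ≤ ·) →
    (∀ q ∈ sp, q ∈ d.keys → some q = prev) →
    (∀ v, prev = some v → ∀ q ∈ sp, v ≤ q) →
    (sp.foldl (fun (st : PySem.Dict String Int × Option String) p =>
        if st.2 = some p then (st.1.modify p 0 (· + 1), st.2)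
        else (st.1.insert p 1, some p)) (d, prev)).1
      = sp.foldl (fun d x => d.modify x 0 (· + 1)) d := by
  induction sp with
  | nil => intro d prev _ _ _; rfl
  | cons x xs ih =>
    intro d prev hpw hinv1 hinv2
    obtain ⟨hx, hpwxs⟩ := List.pairwise_cons.mp hpw
    simp only [List.foldl_cons]
    by_cases hp : prev = some x
    · rw [if_pos hp]
      refine ih _ prev hpwxs (fun q hq hqk => ?_) (fun v hv q hq => hinv2 v hv q (List.mem_cons_of_mem _ hq))
      have : q ∈ (d.insert x ((· + 1) (d.getD x 0))).keys := by
        have := PySem.Dict.keys_modify d x 0 (· + 1)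
        simpa [this] using hqk
      rcases (PySem.Dict.mem_keys_insert _ _ _ _).mp this with hqx | hqd
      · rw [hqx]; exact hp.symm
      · exact hinv1 q (List.mem_cons_of_mem _ hq) hqd
    · rw [if_neg hp]
      have hxd : x ∉ d.keys := fun hmem =>
        hp ((hinv1 x List.mem_cons_self hmem).symm)
      have hxc : d.contains x = false := by
        by_contra hc
        exact hxd ((PySem.Dict.contains_iff_mem_keys d x).mp (by
          cases h : d.contains x with
          | false => exact absurd h hc
          | true => rfl))
      rw [pvInsert_one_eq_modify d x hxc]
      refine ih _ (some x) hpwxs (fun q hq hqk => ?_) (fun v hv q hq => by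
        cases hv; exact hx q hq)
      have : q ∈ (d.insert x ((· + 1) (d.getD x 0))).keys := by
        have := PySem.Dict.keys_modify d x 0 (· + 1)
        simpa [this] using hqk
      rcases (PySem.Dict.mem_keys_insert _ _ _ _).mp this with hqx | hqd
      · rw [hqx]
      · -- q was a key already, so some q = prev; then q ≤ x (inv2) and x ≤ q (sorted): q = x, contradicting prev ≠ some x
        have hqprev := hinv1 q (List.mem_cons_of_mem _ hq) hqd
        have hqlex : q ≤ x := hinv2 q hqprev.symm x List.mem_cons_self
        have hxleq : x ≤ q := hx q hq
        have : q = x := le_antisymm hqlex hxleq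
        exact absurd (this ▸ hqprev.symm) hp

-- ===== VERDICT (by name: the statement is the Claim_ definition above) =====
theorem count_package_prefixes_spec : Claim_equal_count_package_prefixes := by
  intro path_dict level _
  show count_package_prefixes path_dict level = count_package_prefixes_alt path_dict level
  rw [pvA_eq_counter]
  unfold count_package_prefixes_alt
  set prefixes := path_dict.map (fun kv => pvPrefixOf level kv.1) with hpre
  have hsorted : (PySem.List.sorted prefixes (fun x => x) false).Pairwise (· ≤ ·) :=
    PySem.List.sorted_pairwise prefixes (fun x => x)
  have hruns : ((PySem.List.sorted prefixes (fun x => x) false).foldl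
      (fun (st : PySem.Dict String Int × Option String) p =>
        if st.2 = some p then (st.1.modify p 0 (· + 1), st.2)
        else (st.1.insert p 1, some p))
      (PySem.Dict.empty, none)).1
      = PySem.Dict.counter (PySem.List.sorted prefixes (fun x => x) false) := by
    rw [PySem.Dict.counter_eq_foldl]
    exact pvRunScan _ _ _ hsorted (by simp [PySem.Dict.keys_empty]) (by simp)
  simp only [hruns]
  rw [PySem.Dict.items_foldl_insert_fresh _ (fun p => p) _ _
      (fun a _ => PySem.Dict.contains_empty _) (by simp)]
  rw [PySem.Dict.items_counter, PySem.List.dedup_eq_ofList]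
  refine List.map_congr_left (fun k _ => ?_)
  rw [PySem.Dict.getD_counter]
  have hperm : (PySem.List.sorted prefixes (fun x => x) false).Perm prefixes :=
    PySem.List.sorted_perm prefixes (fun x => x) false
  rw [hperm.count_eq]
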